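-- pv_equiv track=rewrite | github.com/yleen/LiZhongYuan_diagram | cayley_table/main.py | gen_binomial_theorem_collection
-- ===== SOURCE A (Python) =====
-- from typing import List
--
-- def gen_binomial_theorem_collection(p_elements: str,
--                                     p_contain_zero: bool,
--                                     p_zero_elem_mark: str,
--                                     p_err_elem_mark: str) -> List[List[str]]:
--     """
--     Generate binomial theorem type collection
--     @param p_elements: elements
--     @param p_contain_zero: verify includes zero
--     @param p_zero_elem_mark: zero element
--     @param p_err_elem_mark: invalid OIE mark
--     @return: binomial theorem type collection
--     """
--
--     comb_and_next_start_collection: List[List[dict]] = []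
--     binomial_theorem_collection: List[List[str]] = []
--
--     if p_contain_zero:
--         binomial_theorem_collection: List[List[str]] = [[p_zero_elem_mark]]
--
--     binomial_theorem_collection.append([p_err_elem_mark])
--
--     for i in range(len(p_elements)):
--         cur_comb_and_next_start_list: List[dict] = []
--         if i == 0:
--             for j in range(len(p_elements)):
--                 cur_comb_and_next_start: dict = {
--                     'combination': p_elements[j],
--                     'next_trip_starting_idx': j + 1
--                 }
--                 cur_comb_and_next_start_list.append(cur_comb_and_next_start)
--         else:
--             pre_comb_and_next_start_list: List[dict] = comb_and_next_start_collection[i - 1]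
--             for pre_comb_and_next_start in pre_comb_and_next_start_list:
--                 pre_comb: str = pre_comb_and_next_start['combination']
--                 for j in range(pre_comb_and_next_start['next_trip_starting_idx'], len(p_elements)):
--                     cur_comb: str = pre_comb + p_elements[j]
--                     cur_comb_and_next_start: dict = {
--                         'combination': cur_comb,
--                         'next_trip_starting_idx': j + 1
--                     }
--                     cur_comb_and_next_start_list.append(cur_comb_and_next_start)
--         comb_and_next_start_collection.append(cur_comb_and_next_start_list)
--
--     for i in range(len(p_elements)):
--         cur_binomial_theorem_item: List[str] = []
--         for j in range(len(comb_and_next_start_collection[i])):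
--             cur_comb: str = comb_and_next_start_collection[i][j]['combination']
--             cur_binomial_theorem_item.append(cur_comb)
--         binomial_theorem_collection.append(cur_binomial_theorem_item)
--
--     return binomial_theorem_collection
-- ===== SOURCE B (Python) =====
-- from itertools import combinations
-- from typing import List
--
-- def gen_binomial_theorem_collection(p_elements: str,
--                                     p_contain_zero: bool,
--                                     p_zero_elem_mark: str,
--                                     p_err_elem_mark: str) -> List[List[str]]:
--     result: List[List[str]] = [[p_zero_elem_mark]] if p_contain_zero else []
--     result.append([p_err_elem_mark])
--     for r in range(1, len(p_elements) + 1):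
--         result.append([''.join(c) for c in combinations(p_elements, r)])
--     return result
-- ===== Notes on version B (the rewrite author's own statement) =====
-- stated objective: simpler
-- what changed: Replaced the dict-based incremental DP over (combination, next_trip_starting_idx) states plus a separate copy pass by a direct per-length generation with itertools.combinations, which yields the same index-lexicographic order.
import Mathlib
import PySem

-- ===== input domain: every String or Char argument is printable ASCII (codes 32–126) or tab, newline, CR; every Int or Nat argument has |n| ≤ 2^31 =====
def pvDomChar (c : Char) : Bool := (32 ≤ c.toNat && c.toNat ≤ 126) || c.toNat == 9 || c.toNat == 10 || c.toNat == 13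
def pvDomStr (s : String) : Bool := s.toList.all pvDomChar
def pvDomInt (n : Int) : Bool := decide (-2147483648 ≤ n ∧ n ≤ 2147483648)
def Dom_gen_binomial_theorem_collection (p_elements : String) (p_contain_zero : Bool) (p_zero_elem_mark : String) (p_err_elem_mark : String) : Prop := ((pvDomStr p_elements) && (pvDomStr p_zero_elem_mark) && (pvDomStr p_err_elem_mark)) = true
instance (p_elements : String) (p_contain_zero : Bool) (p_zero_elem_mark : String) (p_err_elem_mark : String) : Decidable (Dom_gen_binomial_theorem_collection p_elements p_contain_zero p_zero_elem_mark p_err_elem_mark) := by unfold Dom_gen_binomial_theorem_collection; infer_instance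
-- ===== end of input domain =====

-- B replaces A's dict-based incremental DP over (combination, next-start-index) states plus a
-- separate copy pass by a direct per-length generation via combinations (simpler, same order).

-- ===== PORT A =====
-- p_elements[j] as a one-character string; j is always in range in A, default never read
def pvAOne (cs : List Char) (j : Nat) : String := String.ofList [cs.getD j ' ']

-- the i == 0 branch of A's first loop
def pvALevel0 (cs : List Char) : List (String × Nat) :=
  (List.range cs.length).foldl (fun acc j => acc ++ [(pvAOne cs j, j + 1)]) []

-- the i > 0 branch: extend every (combination, next_trip_starting_idx) of the previous level
def pvANext (cs : List Char) (prev : List (String × Nat)) : List (String × Nat) :=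
  prev.foldl (fun acc pc =>
    (List.range' pc.2 (cs.length - pc.2)).foldl
      (fun acc2 j => acc2 ++ [(pc.1 ++ pvAOne cs j, j + 1)]) acc) []

-- A's first loop: build comb_and_next_start_collection
def pvACollect (cs : List Char) : List (List (String × Nat)) :=
  (List.range cs.length).foldl
    (fun coll i =>
      coll ++ [if i = 0 then pvALevel0 cs else pvANext cs (coll.getD (i - 1) [])]) []

def gen_binomial_theorem_collection (p_elements : String) (p_contain_zero : Bool) (p_zero_elem_mark : String) (p_err_elem_mark : String) : List (List String) :=
  let cs := p_elements.toList
  let coll := pvACollect cs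
  let btc : List (List String) := if p_contain_zero then [[p_zero_elem_mark]] else []
  let btc := btc ++ [[p_err_elem_mark]]
  -- A's second loop: copy the 'combination' fields level by level
  (List.range cs.length).foldl
    (fun btc i =>
      btc ++ [(List.range (coll.getD i []).length).foldl
        (fun item j => item ++ [((coll.getD i []).getD j ("", 0)).1]) []]) btc

-- ===== PORT B =====
-- itertools.combinations(l, r) in index-lexicographic order
def pvCombs : Nat → List Char → List (List Char)
  | 0, _ => [[]]
  | _ + 1, [] => []
  | r + 1, c :: cs => (pvCombs r cs).map (fun t => c :: t) ++ pvCombs (r + 1) cs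

def gen_binomial_theorem_collection_alt (p_elements : String) (p_contain_zero : Bool) (p_zero_elem_mark : String) (p_err_elem_mark : String) : List (List String) :=
  let cs := p_elements.toList
  (if p_contain_zero then [[p_zero_elem_mark]] else []) ++ [[p_err_elem_mark]] ++
    (List.range' 1 cs.length).map (fun r => (pvCombs r cs).map (fun c => String.ofList c))

-- ===== PRECONDITION & SPEC =====
def Spec_gen_binomial_theorem_collection (p_elements : String) (p_contain_zero : Bool) (p_zero_elem_mark : String) (p_err_elem_mark : String) (out : List (List String)) : Prop := out = gen_binomial_theorem_collection_alt p_elements p_contain_zero p_zero_elem_mark p_err_elem_mark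
instance (p_elements : String) (p_contain_zero : Bool) (p_zero_elem_mark : String) (p_err_elem_mark : String) (out : List (List String)) : Decidable (Spec_gen_binomial_theorem_collection p_elements p_contain_zero p_zero_elem_mark p_err_elem_mark out) := by unfold Spec_gen_binomial_theorem_collection; infer_instance

-- ===== CLAIM (what is proved, stated in full; the proofs are below) =====
def Claim_equal_gen_binomial_theorem_collection : Prop := ∀ (p_elements : String) (p_contain_zero : Bool) (p_zero_elem_mark : String) (p_err_elem_mark : String), Dom_gen_binomial_theorem_collection p_elements p_contain_zero p_zero_elem_mark p_err_elem_mark → Spec_gen_binomial_theorem_collection p_elements p_contain_zero p_zero_elem_mark p_err_elem_mark (gen_binomial_theorem_collection p_elements p_contain_zero p_zero_elem_mark p_err_elem_mark)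

-- ===== LEMMAS AND PROOFS =====

-- Specification of A's levels: all r-step extensions of prefix p using indices ≥ k,
-- each with its next starting index, in A's generation order.
theorem pvFlatMap_single {α β : Type} (l : List α) (f : α → β) :
    l.flatMap (fun x => [f x]) = l.map f := by
  induction l with
  | nil => rfl
  | cons a l ih => simp [List.flatMap_cons, ih]

def pvE (cs : List Char) : Nat → String → Nat → List (String × Nat)
  | 0, p, k => [(p, k)]
  | r + 1, p, k =>
      (List.range' k (cs.length - k)).flatMap
        (fun j => pvE cs r (p ++ pvAOne cs j) (j + 1))

theorem pvANext_eq (cs : List Char) (L : List (String × Nat)) :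
    pvANext cs L = L.flatMap (fun pc =>
      (List.range' pc.2 (cs.length - pc.2)).map (fun j => (pc.1 ++ pvAOne cs j, j + 1))) := by
  simp only [pvANext, PySem.List.foldl_append_singleton_eq_map,
    PySem.List.foldl_append_eq_flatMap]
  rw [List.nil_append]

theorem pvANext_flatMap {α : Type} (cs : List Char) (l : List α)
    (f : α → List (String × Nat)) :
    pvANext cs (l.flatMap f) = l.flatMap (fun x => pvANext cs (f x)) := by
  simp [pvANext_eq, List.flatMap_assoc]

theorem pvE_step (cs : List Char) :
    ∀ (r : Nat) (p : String) (k : Nat), pvANext cs (pvE cs r p k) = pvE cs (r + 1) p k := by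
  intro r
  induction r with
  | zero => intro p k; simp [pvE, pvANext_eq, pvFlatMap_single]
  | succ r ih =>
      intro p k
      show pvANext cs (pvE cs (r + 1) p k) = pvE cs (r + 2) p k
      rw [show pvE cs (r + 1) p k = (List.range' k (cs.length - k)).flatMap
            (fun j => pvE cs r (p ++ pvAOne cs j) (j + 1)) from rfl,
          pvANext_flatMap]
      show (List.range' k (cs.length - k)).flatMap
            (fun j => pvANext cs (pvE cs r (p ++ pvAOne cs j) (j + 1))) = _
      simp only [ih]
      rfl

theorem pvALevel0_eq (cs : List Char) : pvALevel0 cs = pvE cs 1 "" 0 := by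
  simp only [pvALevel0, PySem.List.foldl_append_singleton_eq_map, List.nil_append]
  show _ = (List.range' 0 (List.length cs - 0)).flatMap (fun j => [("" ++ pvAOne cs j, j + 1)])
  rw [pvFlatMap_single]
  simp [List.range_eq_range']

theorem pvACollect_aux (cs : List Char) :
    ∀ n : Nat,
      (List.range n).foldl
        (fun coll i =>
          coll ++ [if i = 0 then pvALevel0 cs else pvANext cs (coll.getD (i - 1) [])]) [] =
      (List.range n).map (fun i => pvE cs (i + 1) "" 0) := by
  intro n
  induction n with
  | zero => simp
  | succ n ih =>
      rw [List.range_succ, List.foldl_append, ih, List.map_append, List.foldl_cons, List.foldl_nil]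
      congr 1
      cases n with
      | zero => simp [pvALevel0_eq]
      | succ m =>
          have hlen : m < ((List.range (m + 1)).map (fun i => pvE cs (i + 1) "" 0)).length := by
            simp
          have hget : ((List.range (m + 1)).map (fun i => pvE cs (i + 1) "" 0)).getD (m + 1 - 1) [] =
              pvE cs (m + 1) "" 0 := by
            rw [show m + 1 - 1 = m from rfl, List.getD_eq_getElem _ _ hlen]
            simp
          simp only [if_neg (Nat.succ_ne_zero m), hget, pvE_step]
          simp

theorem pvACollect_eq (cs : List Char) :
    pvACollect cs = (List.range cs.length).map (fun i => pvE cs (i + 1) "" 0) :=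
  pvACollect_aux cs cs.length

-- inner copy loop of A's second pass copies a level verbatim (first components)
theorem pvCopy_eq (L : List (String × Nat)) :
    (List.range L.length).map (fun j => (L.getD j ("", 0)).1) = L.map Prod.fst := by
  apply List.ext_getElem
  · simp
  · intro i h1 h2
    simp only [List.getElem_map, List.getElem_range]
    rw [List.getD_eq_getElem _ _ (by simpa using h2)]

-- first components of pvE are exactly the length-r combinations (B's order)
theorem pvE_fst (cs : List Char) :
    ∀ (r k : Nat) (p : String),
      (pvE cs r p k).map Prod.fst =
      (pvCombs r (cs.drop k)).map (fun t => p ++ String.ofList t) := by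
  intro r
  induction r with
  | zero => intro k p; simp [pvE, pvCombs]
  | succ r ih =>
      have main : ∀ (m k : Nat) (p : String), cs.length - k = m →
          (pvE cs (r + 1) p k).map Prod.fst =
          (pvCombs (r + 1) (cs.drop k)).map (fun t => p ++ String.ofList t) := by
        intro m
        induction m with
        | zero =>
            intro k p hm
            have hdrop : cs.drop k = [] := List.drop_eq_nil_of_le (by omega)
            simp [pvE, hm, hdrop, pvCombs]
        | succ m ihm =>
            intro k p hm
            have hk : k < cs.length := by omega
            have hdrop : cs.drop k = cs[k] :: cs.drop (k + 1) := List.drop_eq_getElem_cons hk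
            have hC : cs[k]?.getD ' ' = cs[k] := by simp [List.getElem?_eq_getElem hk]
            show ((List.range' k (cs.length - k)).flatMap
                (fun j => pvE cs r (p ++ pvAOne cs j) (j + 1))).map Prod.fst = _
            rw [hm, List.range'_succ, List.flatMap_cons, List.map_append]
            have h1 : (pvE cs r (p ++ pvAOne cs k) (k + 1)).map Prod.fst =
                (pvCombs r (cs.drop (k + 1))).map
                  (fun t => p ++ String.ofList (cs[k] :: t)) := by
              rw [ih]
              apply List.map_congr_left
              intro t _
              simp only [pvAOne, List.getD, hC, String.append_assoc]
              rw [← String.ofList_append]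
              simp
            have h2 : ((List.range' (k + 1) m).flatMap
                (fun j => pvE cs r (p ++ pvAOne cs j) (j + 1))).map Prod.fst =
                (pvCombs (r + 1) (cs.drop (k + 1))).map (fun t => p ++ String.ofList t) := by
              have := ihm (k + 1) p (by omega)
              simpa [pvE, show cs.length - (k + 1) = m from by omega] using this
            rw [h1, h2, hdrop]
            show _ = ((pvCombs r (cs.drop (k+1))).map (fun t => cs[k] :: t)
                ++ pvCombs (r + 1) (cs.drop (k+1))).map (fun t => p ++ String.ofList t)
            simp [List.map_map, Function.comp]
      intro k p
      exact main (cs.length - k) k p rfl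

-- ===== VERDICT (by name: the statement is the Claim_ definition above) =====
theorem gen_binomial_theorem_collection_spec : Claim_equal_gen_binomial_theorem_collection := by
  intro p_elements p_contain_zero p_zero_elem_mark p_err_elem_mark _
  unfold Spec_gen_binomial_theorem_collection
  unfold gen_binomial_theorem_collection gen_binomial_theorem_collection_alt
  simp only [pvACollect_eq, PySem.List.foldl_append_singleton_eq_map, List.append_assoc]
  congr 1
  congr 1
  rw [List.range'_eq_map_range, List.map_map]
  apply List.map_congr_left
  intro i hi
  have hlen : i < ((List.range p_elements.toList.length).map
      (fun i => pvE p_elements.toList (i + 1) "" 0)).length := by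
    simpa using List.mem_range.mp hi
  have hget : ((List.range p_elements.toList.length).map
      (fun i => pvE p_elements.toList (i + 1) "" 0)).getD i [] =
      pvE p_elements.toList (i + 1) "" 0 := by
    rw [List.getD_eq_getElem _ _ hlen]; simp
  rw [hget, List.nil_append, pvCopy_eq, pvE_fst]
  simp [Nat.add_comm 1 i, Function.comp]
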